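-- pv_equiv track=rewrite | github.com/YuanyuanMaggie/ragchatbot | backend/profile_search_tools.py | _format_all_summary
-- ===== SOURCE A (Python) =====
-- def _format_all_summary(sections: list) -> str:
--     """Format overview of all profile sections"""
--     summary = ["**Yuanyuan Li - Professional Profile Overview**\n"]
--
--     # Count sections by type
--     section_counts = {}
--     for section in sections:
--         stype = section.get("section_type", "general")
--         section_counts[stype] = section_counts.get(stype, 0) + 1
--
--     summary.append("**Profile Sections:**")
--     for stype, count in sorted(section_counts.items()):
--         summary.append(f"- {stype.title()}: {count} section(s)")
--
--     # List key roles
--     roles = [s for s in sections if s.get("section_type") == "role"]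
--     if roles:
--         summary.append("\n**Key Roles:**")
--         for role in roles[:3]:  # Top 3 roles
--             title = role.get("title", "Unknown")
--             company = role.get("company", "")
--             timeframe = role.get("timeframe", "")
--             summary.append(f"- {title} at {company} ({timeframe})")
--
--     # List key projects
--     projects = [s for s in sections if s.get("section_type") == "project"]
--     if projects:
--         summary.append(f"\n**Key Projects:** {len(projects)} total")
--         for proj in projects[:3]:  # Top 3 projects
--             title = proj.get("title", "Unknown")
--             summary.append(f"- {title}")
--
--     return "\n".join(summary)
-- ===== SOURCE B (Python) =====
-- def _format_all_summary(sections: list) -> str: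
--     """Format overview of all profile sections (stable sort by type + one group scan; no counting dict, no filters)."""
--     tagged = [(s.get("section_type", "general"), s) for s in sections]
--     tagged.sort(key=lambda t: t[0])          # stable: original order kept inside each type
--     count_lines, roles, projects = [], [], []
--     i, n = 0, len(tagged)
--     while i < n:
--         stype = tagged[i][0]
--         j = i + 1
--         while j < n and tagged[j][0] == stype:
--             j += 1
--         count_lines.append(f"- {stype.title()}: {j - i} section(s)")
--         if stype == "role":
--             roles = [t[1] for t in tagged[i:j]]
--         elif stype == "project":
--             projects = [t[1] for t in tagged[i:j]]
--         i = j
--     out = ["**Yuanyuan Li - Professional Profile Overview**\n", "**Profile Sections:**"]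
--     out += count_lines
--     if roles:
--         out.append("\n**Key Roles:**")
--         for r in roles[:3]:
--             out.append(f"- {r.get('title', 'Unknown')} at {r.get('company', '')} ({r.get('timeframe', '')})")
--     if projects:
--         out.append(f"\n**Key Projects:** {len(projects)} total")
--         for p in projects[:3]:
--             out.append(f"- {p.get('title', 'Unknown')}")
--     return "\n".join(out)
-- ===== Notes on version B (the rewrite author's own statement) =====
-- stated objective: alternative
-- what changed: B drops A's counting dict and the two filter comprehensions entirely: it stably sorts (section_type, section) pairs once and derives the sorted count lines, the roles group and the projects group from a single run-detecting scan over the sorted list (sort-then-group vs dict counting plus repeated filtering).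
import Mathlib
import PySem

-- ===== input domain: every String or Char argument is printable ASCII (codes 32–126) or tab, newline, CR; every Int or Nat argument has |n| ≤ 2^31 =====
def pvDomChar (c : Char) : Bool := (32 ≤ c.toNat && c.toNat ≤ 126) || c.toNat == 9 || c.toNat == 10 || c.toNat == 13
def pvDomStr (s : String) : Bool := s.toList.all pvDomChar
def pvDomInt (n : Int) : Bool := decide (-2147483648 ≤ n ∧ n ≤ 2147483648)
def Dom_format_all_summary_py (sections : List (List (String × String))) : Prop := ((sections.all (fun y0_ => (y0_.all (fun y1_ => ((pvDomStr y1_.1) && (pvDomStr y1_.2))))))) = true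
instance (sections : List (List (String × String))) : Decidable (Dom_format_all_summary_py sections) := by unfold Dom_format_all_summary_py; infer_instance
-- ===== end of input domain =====

-- B replaces A's counting dict and the two filter passes by one stable sort of
-- (section_type, section) pairs followed by a single run-detecting group scan (objective: alternative).

-- shared helpers: dict.get on a section (association list, first match), and str.title (exact on ASCII)
def secGet? (s : List (String × String)) (k : String) : Option String :=
  (s.find? (fun kv => kv.1 == k)).map (·.2)

def secGet (s : List (String × String)) (k dflt : String) : String :=
  (secGet? s k).getD dflt

-- str.title for ASCII: a letter after a non-letter is uppercased, other letters lowercased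
def pyTitleGo : Bool → List Char → List Char
  | _, [] => []
  | prevAlpha, c :: cs =>
    (if PySem.Chars.isalpha c then
       (if prevAlpha then PySem.Chars.lowerChar c else PySem.Chars.upperChar c)
     else c) :: pyTitleGo (PySem.Chars.isalpha c) cs

def pyTitle (s : String) : String := String.ofList (pyTitleGo false s.toList)

def countLine (p : String × Int) : String :=
  "- " ++ pyTitle p.1 ++ ": " ++ PySem.Int.toStr p.2 ++ " section(s)"

def roleLine (r : List (String × String)) : String :=
  "- " ++ secGet r "title" "Unknown" ++ " at " ++ secGet r "company" "" ++
    " (" ++ secGet r "timeframe" "" ++ ")"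

def projLine (p : List (String × String)) : String :=
  "- " ++ secGet p "title" "Unknown"

-- A's per-section count update (the dict line of A's loop)
def fasCount (d : PySem.Dict String Int) (sec : List (String × String)) : PySem.Dict String Int :=
  let stype := secGet sec "section_type" "general"
  d.insert stype (d.getD stype 0 + 1)

-- ===== PORT A =====
def format_all_summary_py (sections : List (List (String × String))) : String :=
  let summary : List String := ["**Yuanyuan Li - Professional Profile Overview**\n"]
  let section_counts : PySem.Dict String Int :=
    sections.foldl fasCount PySem.Dict.empty
  let summary := summary ++ ["**Profile Sections:**"]
  let summary :=
    (PySem.List.sorted2 section_counts.items (fun p => p.1) (fun p => p.2) false).foldl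
      (fun acc p => acc ++ [countLine p]) summary
  let roles := sections.filter (fun s => secGet? s "section_type" == some "role")
  let summary :=
    if roles.isEmpty then summary
    else (PySem.List.slice roles none (some 3)).foldl
      (fun acc r => acc ++ [roleLine r]) (summary ++ ["\n**Key Roles:**"])
  let projects := sections.filter (fun s => secGet? s "section_type" == some "project")
  let summary :=
    if projects.isEmpty then summary
    else (PySem.List.slice projects none (some 3)).foldl
      (fun acc p => acc ++ [projLine p])
      (summary ++ ["\n**Key Projects:** " ++ PySem.Int.toStr (projects.length : Int) ++ " total"])
  PySem.Str.join "\n" summary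

-- ===== PORT B =====
-- B's group scan over the sorted tagged list: each step consumes one maximal run of equal
-- section_type (the inner 'while j < n and tagged[j][0] == stype' loop) and emits its count line;
-- the run is kept whole as the roles / projects group when its type matches.
def fasScan : List (String × List (String × String)) →
    List String × List (List (String × String)) × List (List (String × String))
  | [] => ([], [], [])
  | (k, s) :: rest =>
    let run := rest.takeWhile (fun t => t.1 == k)
    let r := fasScan (rest.dropWhile (fun t => t.1 == k))
    (countLine (k, (run.length : Int) + 1) :: r.1,
     if k == "role" then s :: run.map (·.2) else r.2.1,
     if k == "project" then s :: run.map (·.2) else r.2.2)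
termination_by l => l.length
decreasing_by
  have := List.length_dropWhile_le (fun t => t.1 == k) rest
  simp at this ⊢; omega

def format_all_summary_py_alt (sections : List (List (String × String))) : String :=
  let tagged := sections.map (fun s => (secGet s "section_type" "general", s))
  let tagged := PySem.List.sorted tagged (fun t => t.1) false
  let r := fasScan tagged
  let out := ["**Yuanyuan Li - Professional Profile Overview**\n", "**Profile Sections:**"] ++ r.1
  let out :=
    if r.2.1.isEmpty then out
    else out ++ ["\n**Key Roles:**"] ++ (PySem.List.slice r.2.1 none (some 3)).map roleLine
  let out :=
    if r.2.2.isEmpty then out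
    else out ++ ["\n**Key Projects:** " ++ PySem.Int.toStr (r.2.2.length : Int) ++ " total"]
      ++ (PySem.List.slice r.2.2 none (some 3)).map projLine
  PySem.Str.join "\n" out

-- ===== PRECONDITION & SPEC =====
def Spec_format_all_summary_py (sections : List (List (String × String))) (out : String) : Prop := out = format_all_summary_py_alt sections
instance (sections : List (List (String × String))) (out : String) : Decidable (Spec_format_all_summary_py sections out) := by unfold Spec_format_all_summary_py; infer_instance

-- ===== CLAIM (what is proved, stated in full; the proofs are below) =====
def Claim_equal_format_all_summary_py : Prop := ∀ (sections : List (List (String × String))), Dom_format_all_summary_py sections → Spec_format_all_summary_py sections (format_all_summary_py sections)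

-- ===== LEMMAS AND PROOFS =====

-- A's predicate 'section_type == t' in the two spellings the ports use (t ≠ "general")
theorem stype_eq_iff (s : List (String × String)) (t : String) (ht : t ≠ "general") :
    (secGet s "section_type" "general" == t) = (secGet? s "section_type" == some t) := by
  unfold secGet
  cases h : secGet? s "section_type" with
  | none => simp [Ne.symm ht]
  | some v => simp

-- proof-only abbreviations for the objects both ports are compared through
def tagOf (sections : List (List (String × String))) : List (String × List (String × String)) :=
  sections.map (fun s => (secGet s "section_type" "general", s))

def grp (sections : List (List (String × String))) (k : String) :
    List (String × List (String × String)) :=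
  (tagOf sections).filter (fun x => x.1 == k)

def ksOf (sections : List (List (String × String))) : List String :=
  PySem.List.sorted (PySem.Set.ofList (sections.map (fun s => secGet s "section_type" "general")))
    (fun x => x) false

theorem mem_ksOf (sections : List (List (String × String))) (t : String) :
    t ∈ ksOf sections ↔ t ∈ sections.map (fun s => secGet s "section_type" "general") := by
  unfold ksOf
  rw [PySem.List.mem_sorted, PySem.Set.mem_ofList]

-- ---- insertBy basics ----
theorem insertBy_nil {α : Type} (b : α → α → Bool) (x : α) :
    PySem.List.insertBy b x [] = [x] := rfl

theorem insertBy_cons {α : Type} (b : α → α → Bool) (x y : α) (ys : List α) :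
    PySem.List.insertBy b x (y :: ys) =
      if b x y then x :: y :: ys else y :: PySem.List.insertBy b x ys := rfl

theorem insertBy_congr {α : Type} (b1 b2 : α → α → Bool) (x : α) :
    ∀ (ys : List α), (∀ y ∈ ys, b1 x y = b2 x y) →
      PySem.List.insertBy b1 x ys = PySem.List.insertBy b2 x ys := by
  intro ys
  induction ys with
  | nil => intro _; rfl
  | cons y ys ih =>
    intro h
    rw [insertBy_cons, insertBy_cons, h y (by simp)]
    by_cases hb : b2 x y = true
    · simp [hb]
    · simp only [Bool.not_eq_true] at hb
      simp [hb, ih (fun z hz => h z (by simp [hz]))]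

theorem foldl_insertBy_congr {α : Type} (b1 b2 : α → α → Bool) :
    ∀ (xs acc : List α), (∀ a ∈ xs, ∀ y, (y ∈ acc ∨ y ∈ xs) → b1 a y = b2 a y) →
      xs.foldl (fun acc x => PySem.List.insertBy b1 x acc) acc
        = xs.foldl (fun acc x => PySem.List.insertBy b2 x acc) acc := by
  intro xs
  induction xs with
  | nil => intro _ _; rfl
  | cons x xs ih =>
    intro acc h
    simp only [List.foldl_cons]
    rw [insertBy_congr b1 b2 x acc (fun y hy => h x (by simp) y (Or.inl hy))]
    refine ih (PySem.List.insertBy b2 x acc) (fun a ha y hy => h a (by simp [ha]) y ?_)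
    rcases hy with hy | hy
    · rcases (PySem.List.mem_insertBy _ _ _ _).1 hy with rfl | hy'
      · exact Or.inr (by simp)
      · exact Or.inl hy'
    · exact Or.inr (by simp [hy])

-- sorted2 on pairs with pairwise-distinct first components is sorted-by-first-component
theorem sorted2_eq_sorted_fst (xs : List (String × Int)) (hnd : (xs.map (fun p => p.1)).Nodup) :
    PySem.List.sorted2 xs (fun p => p.1) (fun p => p.2) false
      = PySem.List.sorted xs (fun p => p.1) false := by
  have hinj := List.inj_on_of_nodup_map hnd
  have h2 : PySem.List.sorted2 xs (fun p => p.1) (fun p => p.2) false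
      = xs.foldl (fun acc x => PySem.List.insertBy
          (fun a b => decide (a.1 < b.1) || (!decide (b.1 < a.1) && decide (a.2 < b.2))) x acc) [] := rfl
  have h1 : PySem.List.sorted xs (fun p => p.1) false
      = xs.foldl (fun acc x => PySem.List.insertBy (fun a b => decide (a.1 < b.1)) x acc) [] :=
    PySem.List.sorted_eq_foldl_insertBy xs (fun p => p.1)
  rw [h1, h2]
  apply foldl_insertBy_congr
  intro a ha y hy
  rcases hy with hy | hy
  · simp at hy
  · rcases lt_trichotomy a.1 y.1 with hlt | heq | hgt
    · simp [hlt]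
    · have : a = y := hinj ha hy heq
      subst this
      simp
    · simp [hgt, asymm hgt]

-- ---- stability of the insertion sort under per-key filtering ----
theorem filter_insertBy_fst (t : String) (x : String × List (String × String)) :
    ∀ (ys : List (String × List (String × String))), ys.Pairwise (fun a b => a.1 ≤ b.1) →
    (PySem.List.insertBy (fun a b => decide (a.1 < b.1)) x ys).filter (fun y => y.1 == t)
      = if x.1 == t then ys.filter (fun y => y.1 == t) ++ [x]
        else ys.filter (fun y => y.1 == t) := by
  intro ys
  induction ys with
  | nil =>
    intro _
    rw [insertBy_nil]
    by_cases hx : x.1 = t <;> simp [hx]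
  | cons y ys ih =>
    intro hys
    have hhead := (List.pairwise_cons.1 hys).1
    have htail := (List.pairwise_cons.1 hys).2
    rw [insertBy_cons]
    by_cases hb : x.1 < y.1
    · rw [if_pos (by simpa using hb)]
      by_cases hx : x.1 = t
      · have hnil : (y :: ys).filter (fun z => z.1 == t) = [] := by
          rw [List.filter_eq_nil_iff]
          intro z hz
          have hyz : y.1 ≤ z.1 := by
            rcases List.mem_cons.1 hz with rfl | hz'
            · exact le_refl _
            · exact hhead z hz'
          have hlt : t < z.1 := lt_of_lt_of_le (hx ▸ hb) hyz
          simp [Ne.symm (ne_of_lt hlt)]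
        rw [List.filter_cons, if_pos (show ((x.1 == t) = true) by simp [hx]), hnil]
        simp [show (x.1 == t) = true by simp [hx]]
      · rw [List.filter_cons, if_neg (show ¬((x.1 == t) = true) by simp [hx]),
          if_neg (show ¬((x.1 == t) = true) by simp [hx])]
    · rw [if_neg (by simpa using hb), List.filter_cons, ih htail]
      by_cases hy : y.1 = t <;> by_cases hx : x.1 = t <;>
        simp [hy, hx]

theorem filter_sorted_fst (xs : List (String × List (String × String))) (t : String) :
    (PySem.List.sorted xs (fun u => u.1) false).filter (fun y => y.1 == t)
      = xs.filter (fun y => y.1 == t) := by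
  induction xs using List.reverseRecOn with
  | nil => rfl
  | append_singleton xs x ih =>
    have h1 : PySem.List.sorted (xs ++ [x]) (fun u => u.1) false
        = PySem.List.insertBy (fun a b => decide (a.1 < b.1)) x
            (PySem.List.sorted xs (fun u => u.1) false) := by
      rw [PySem.List.sorted_eq_foldl_insertBy, PySem.List.sorted_eq_foldl_insertBy,
        List.foldl_append]
      rfl
    rw [h1, filter_insertBy_fst t x _ (PySem.List.sorted_pairwise xs (fun u => u.1))]
    by_cases hx : x.1 = t <;> simp [hx, List.filter_append, ih]

-- two lists sorted (≤ on first components) with identical per-key filters are equal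
theorem eq_of_sorted_filters_fst :
    ∀ (l1 l2 : List (String × List (String × String))),
      l1.Pairwise (fun a b => a.1 ≤ b.1) → l2.Pairwise (fun a b => a.1 ≤ b.1) →
      (∀ t, l1.filter (fun x => x.1 == t) = l2.filter (fun x => x.1 == t)) → l1 = l2 := by
  intro l1
  induction l1 with
  | nil =>
    intro l2 _ _ h
    cases l2 with
    | nil => rfl
    | cons b t2 =>
      have hb := h b.1
      rw [List.filter_cons] at hb
      simp at hb
  | cons a t1 ih =>
    intro l2 h1 h2 h
    cases l2 with
    | nil =>
      have ha := h a.1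
      rw [List.filter_cons] at ha
      simp at ha
    | cons b t2 =>
      have haIn2 : a ∈ b :: t2 := by
        have hm : a ∈ (b :: t2).filter (fun x => x.1 == a.1) := by
          rw [← h a.1, List.filter_cons]
          simp
        exact (List.mem_filter.1 hm).1
      have hbIn1 : b ∈ a :: t1 := by
        have hm : b ∈ (a :: t1).filter (fun x => x.1 == b.1) := by
          rw [h b.1, List.filter_cons]
          simp
        exact (List.mem_filter.1 hm).1
      have hle1 : a.1 ≤ b.1 := by
        rcases List.mem_cons.1 hbIn1 with heq | hmem
        · rw [heq]
        · exact (List.pairwise_cons.1 h1).1 b hmem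
      have hle2 : b.1 ≤ a.1 := by
        rcases List.mem_cons.1 haIn2 with heq | hmem
        · rw [heq]
        · exact (List.pairwise_cons.1 h2).1 a hmem
      have hk : a.1 = b.1 := le_antisymm hle1 hle2
      have hfa := h a.1
      rw [List.filter_cons, List.filter_cons] at hfa
      have hba : (b.1 == a.1) = true := by simp [hk]
      simp [hba] at hfa
      obtain ⟨hab, htl⟩ := hfa
      rw [hab]
      congr 1
      apply ih t2 (List.pairwise_cons.1 h1).2 (List.pairwise_cons.1 h2).2
      intro t
      have ht := h t
      rw [List.filter_cons, List.filter_cons, ← hab] at ht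
      by_cases hc : (a.1 == t) = true
      · simp [hc] at ht
        exact ht
      · simp only [Bool.not_eq_true] at hc
        simp [hc] at ht
        exact ht

-- ---- takeWhile / dropWhile over a run followed by a failing remainder ----
theorem takeWhile_append_all {α : Type} (p : α → Bool) (r : List α) (hr : ∀ x ∈ r, p x = false) :
    ∀ (g : List α), (∀ x ∈ g, p x = true) → (g ++ r).takeWhile p = g := by
  intro g
  induction g with
  | nil =>
    intro _
    cases r with
    | nil => rfl
    | cons y ys => simp [hr y (by simp)]
  | cons x xs ih =>
    intro hg
    rw [List.cons_append, List.takeWhile_cons, hg x (by simp)]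
    simp [ih (fun y hy => hg y (by simp [hy]))]

theorem dropWhile_append_all {α : Type} (p : α → Bool) (r : List α) (hr : ∀ x ∈ r, p x = false) :
    ∀ (g : List α), (∀ x ∈ g, p x = true) → (g ++ r).dropWhile p = r := by
  intro g
  induction g with
  | nil =>
    intro _
    cases r with
    | nil => rfl
    | cons y ys => simp [hr y (by simp)]
  | cons x xs ih =>
    intro hg
    rw [List.cons_append, List.dropWhile_cons, hg x (by simp)]
    simp [ih (fun y hy => hg y (by simp [hy]))]

-- unfolding equation of B's group scan
theorem fasScan_cons (k : String) (s : List (String × String))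
    (rest : List (String × List (String × String))) :
    fasScan ((k, s) :: rest) =
      (countLine (k, ((rest.takeWhile (fun t => t.1 == k)).length : Int) + 1)
          :: (fasScan (rest.dropWhile (fun t => t.1 == k))).1,
       if k == "role" then s :: (rest.takeWhile (fun t => t.1 == k)).map (·.2)
         else (fasScan (rest.dropWhile (fun t => t.1 == k))).2.1,
       if k == "project" then s :: (rest.takeWhile (fun t => t.1 == k)).map (·.2)
         else (fasScan (rest.dropWhile (fun t => t.1 == k))).2.2) := by
  rw [fasScan]

-- keys of the flattened group list are pairwise ≤
theorem pairwise_flatMap_fst (G : String → List (String × List (String × String))) :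
    ∀ (ks : List String), ks.Pairwise (· < ·) → (∀ k ∈ ks, ∀ x ∈ G k, x.1 = k) →
      (ks.flatMap G).Pairwise (fun a b => a.1 ≤ b.1) := by
  intro ks
  induction ks with
  | nil => intro _ _; simp
  | cons k ks ih =>
    intro hks hkey
    rw [List.flatMap_cons, List.pairwise_append]
    refine ⟨?_, ?_, ?_⟩
    · apply List.pairwise_of_forall_mem_list
      intro a ha b hb
      rw [hkey k (by simp) a ha, hkey k (by simp) b hb]
    · exact ih (List.pairwise_cons.1 hks).2 (fun k' hk' x hx => hkey k' (by simp [hk']) x hx)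
    · intro a ha b hb
      rw [List.mem_flatMap] at hb
      obtain ⟨k', hk', hbk⟩ := hb
      rw [hkey k (by simp) a ha, hkey k' (by simp [hk']) b hbk]
      exact le_of_lt ((List.pairwise_cons.1 hks).1 k' hk')

-- per-key filter of the flattened group list
theorem filter_flatMap_grp (sections : List (List (String × String))) (t : String) :
    ∀ (ks : List String), ks.Nodup →
      (t ∉ ks → ∀ x ∈ tagOf sections, x.1 ≠ t) →
      (ks.flatMap (grp sections)).filter (fun x => x.1 == t)
        = (tagOf sections).filter (fun x => x.1 == t) := by
  intro ks
  induction ks with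
  | nil =>
    intro _ h
    have : (tagOf sections).filter (fun x => x.1 == t) = [] := by
      rw [List.filter_eq_nil_iff]
      intro x hx
      simp [h (by simp) x hx]
    simp [this]
  | cons k ks ih =>
    intro hnd h
    rw [List.flatMap_cons, List.filter_append]
    by_cases hkt : k = t
    · subst hkt
      have hinner : (grp sections k).filter (fun x => x.1 == k) = grp sections k := by
        rw [List.filter_eq_self]
        intro x hx
        exact (List.mem_filter.1 hx).2
      have hrest : (ks.flatMap (grp sections)).filter (fun x => x.1 == k) = [] := by
        rw [List.filter_eq_nil_iff]
        intro x hx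
        rw [List.mem_flatMap] at hx
        obtain ⟨k', hk', hxk⟩ := hx
        have hx1 : (x.1 == k') = true := (List.mem_filter.1 hxk).2
        have : x.1 = k' := by simpa using hx1
        have hne : k' ≠ k := by
          intro hh
          exact (List.nodup_cons.1 hnd).1 (hh ▸ hk')
        simp [this, hne]
      rw [hinner, hrest, List.append_nil]
      rfl
    · have hinner : (grp sections k).filter (fun x => x.1 == t) = [] := by
        rw [List.filter_eq_nil_iff]
        intro x hx
        have hx1 : (x.1 == k) = true := (List.mem_filter.1 hx).2
        have : x.1 = k := by simpa using hx1
        simp [this, hkt]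
      rw [hinner, List.nil_append]
      apply ih (List.nodup_cons.1 hnd).2
      intro hnot
      refine h ?_
      intro hmem
      rcases List.mem_cons.1 hmem with hh | hh
      · exact hkt hh.symm
      · exact hnot hh

-- group sizes are the counts A's dict collects
theorem grp_len (sections : List (List (String × String))) (k : String) :
    (grp sections k).length
      = (sections.map (fun s => secGet s "section_type" "general")).count k := by
  unfold grp tagOf
  induction sections with
  | nil => rfl
  | cons s ss ih =>
    simp only [List.map_cons, List.filter_cons, List.count_cons]
    by_cases hc : secGet s "section_type" "general" = k
    · simp [hc, ih]
    · simp [hc, ih]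

-- the sections of a group are A's filtered list (t ≠ "general")
theorem grp_map (sections : List (List (String × String))) (t : String) (ht : t ≠ "general") :
    (grp sections t).map (fun x => x.2)
      = sections.filter (fun s => secGet? s "section_type" == some t) := by
  unfold grp tagOf
  induction sections with
  | nil => rfl
  | cons s ss ih =>
    simp only [List.map_cons, List.filter_cons]
    rw [stype_eq_iff s t ht]
    by_cases hc : (secGet? s "section_type" == some t) = true
    · rw [if_pos hc, if_pos hc, List.map_cons, ih]
    · rw [if_neg hc, if_neg hc, ih]

-- B's role / project components are A's filtered lists
theorem roles_comp (sections : List (List (String × String))) :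
    (if "role" ∈ ksOf sections then (grp sections "role").map (fun x => x.2) else [])
      = sections.filter (fun s => secGet? s "section_type" == some "role") := by
  by_cases hm : "role" ∈ ksOf sections
  · rw [if_pos hm]
    exact grp_map sections "role" (by decide)
  · rw [if_neg hm]
    symm
    rw [List.filter_eq_nil_iff]
    intro s hs hc
    simp only [beq_iff_eq] at hc
    have h1 : secGet s "section_type" "general" = "role" := by
      unfold secGet
      rw [hc]
      rfl
    exact hm ((mem_ksOf sections "role").2 (by
      rw [List.mem_map]
      exact ⟨s, hs, h1⟩))

theorem projects_comp (sections : List (List (String × String))) :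
    (if "project" ∈ ksOf sections then (grp sections "project").map (fun x => x.2) else [])
      = sections.filter (fun s => secGet? s "section_type" == some "project") := by
  by_cases hm : "project" ∈ ksOf sections
  · rw [if_pos hm]
    exact grp_map sections "project" (by decide)
  · rw [if_neg hm]
    symm
    rw [List.filter_eq_nil_iff]
    intro s hs hc
    simp only [beq_iff_eq] at hc
    have h1 : secGet s "section_type" "general" = "project" := by
      unfold secGet
      rw [hc]
      rfl
    exact hm ((mem_ksOf sections "project").2 (by
      rw [List.mem_map]
      exact ⟨s, hs, h1⟩))

-- A's sorted dict items, named: sorted distinct keys paired with their counts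
theorem a_counts (sections : List (List (String × String))) :
    PySem.List.sorted2 (List.foldl fasCount PySem.Dict.empty sections).items
        (fun p => p.1) (fun p => p.2) false
      = (ksOf sections).map (fun k =>
          (k, ((sections.map (fun s => secGet s "section_type" "general")).count k : Int))) := by
  have h1 : List.foldl fasCount PySem.Dict.empty sections
      = PySem.Dict.counter (sections.map (fun s => secGet s "section_type" "general")) := by
    rw [← PySem.Dict.foldl_insert_getD_add_one_eq_counter, List.foldl_map]
    rfl
  rw [h1, PySem.Dict.items_counter]
  have hnd : ((((PySem.Set.ofList (sections.map (fun s => secGet s "section_type" "general"))) : List String).map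
      (fun k => (k, ((sections.map (fun s => secGet s "section_type" "general")).count k : Int)))).map
        (fun p => p.1)).Nodup := by
    rw [List.map_map,
      show ((fun (p : String × Int) => p.1) ∘ (fun k =>
          (k, ((sections.map (fun s => secGet s "section_type" "general")).count k : Int))))
        = id from rfl,
      List.map_id]
    exact PySem.Set.nodup_ofList _
  rw [sorted2_eq_sorted_fst _ hnd]
  apply PySem.List.sorted_eq_of_perm_of_pairwise_lt
  · exact List.Perm.map _ (PySem.List.sorted_perm _ _ _)
  · rw [List.pairwise_map]
    exact PySem.List.sorted_ofList_pairwise_lt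
      (xs := sections.map (fun s => secGet s "section_type" "general"))

-- the stable sort of the tagged list is the concatenation of its groups in key order
theorem sorted_tag_eq (sections : List (List (String × String))) :
    PySem.List.sorted (tagOf sections) (fun t => t.1) false
      = (ksOf sections).flatMap (grp sections) := by
  apply eq_of_sorted_filters_fst
  · exact PySem.List.sorted_pairwise _ _
  · apply pairwise_flatMap_fst
    · exact PySem.List.sorted_ofList_pairwise_lt
        (xs := sections.map (fun s => secGet s "section_type" "general"))
    · intro k _ x hx
      have := (List.mem_filter.1 hx).2
      simpa using this
  · intro t
    rw [filter_sorted_fst]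
    symm
    apply filter_flatMap_grp
    · exact (PySem.List.sorted_ofList_pairwise_lt
        (xs := sections.map (fun s => secGet s "section_type" "general"))).imp ne_of_lt
    · intro hnot x hx
      unfold tagOf at hx
      rw [List.mem_map] at hx
      obtain ⟨s, hs, rfl⟩ := hx
      intro hh
      exact hnot ((mem_ksOf sections t).2 (by
        rw [List.mem_map]
        exact ⟨s, hs, hh⟩))

-- B's scan over the concatenated groups
theorem fasScan_flatMap (G : String → List (String × List (String × String))) :
    ∀ (ks : List String), ks.Pairwise (· < ·) →
      (∀ k ∈ ks, G k ≠ []) → (∀ k ∈ ks, ∀ x ∈ G k, x.1 = k) →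
      fasScan (ks.flatMap G) =
        (ks.map (fun k => countLine (k, ((G k).length : Int))),
         if "role" ∈ ks then (G "role").map (fun x => x.2) else [],
         if "project" ∈ ks then (G "project").map (fun x => x.2) else []) := by
  intro ks
  induction ks with
  | nil =>
    intro _ _ _
    simp [fasScan]
  | cons k ks ih =>
    intro hks hne hkey
    obtain ⟨hd, tl, hGk⟩ : ∃ hd tl, G k = hd :: tl := by
      cases h : G k with
      | nil => exact absurd h (hne k (by simp))
      | cons hd tl => exact ⟨hd, tl, rfl⟩
    have hhd1 : hd.1 = k := hkey k (by simp) hd (by rw [hGk]; simp)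
    have hrel : ∀ k' ∈ ks, k < k' := (List.pairwise_cons.1 hks).1
    have hgkey : ∀ y ∈ tl, (y.1 == hd.1) = true := by
      intro y hy
      have : y.1 = k := hkey k (by simp) y (by rw [hGk]; simp [hy])
      simp [this, hhd1]
    have hrkey : ∀ y ∈ ks.flatMap G, (y.1 == hd.1) = false := by
      intro y hy
      rw [List.mem_flatMap] at hy
      obtain ⟨k', hk', hyk⟩ := hy
      have hy1 : y.1 = k' := hkey k' (by simp [hk']) y hyk
      have hne' : k' ≠ k := (ne_of_lt (hrel k' hk')).symm
      simp [hy1, hhd1, hne']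
    have hflat : (k :: ks).flatMap G = (hd.1, hd.2) :: (tl ++ ks.flatMap G) := by
      rw [List.flatMap_cons, hGk]
      rfl
    have htake : (tl ++ ks.flatMap G).takeWhile (fun t => t.1 == hd.1) = tl :=
      takeWhile_append_all _ _ hrkey tl hgkey
    have hdrop : (tl ++ ks.flatMap G).dropWhile (fun t => t.1 == hd.1) = ks.flatMap G :=
      dropWhile_append_all _ _ hrkey tl hgkey
    rw [hflat, fasScan_cons, htake, hdrop,
      ih (List.pairwise_cons.1 hks).2 (fun k' h => hne k' (by simp [h]))
        (fun k' h x hx => hkey k' (by simp [h]) x hx)]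
    refine congrArg₂ Prod.mk ?_ (congrArg₂ Prod.mk ?_ ?_)
    · have hlen : (((hd :: tl).length : Nat) : Int) = ((tl.length : Int) + 1) := by
        rw [List.length_cons]
        push_cast
        ring
      rw [List.map_cons, hhd1, hGk, hlen]
    · rw [hhd1]
      by_cases hr : k = "role"
      · subst hr
        simp only [beq_self_eq_true, if_true, List.mem_cons, true_or]
        rw [hGk, List.map_cons]
      · have h1 : (k == "role") = false := by simp [hr]
        have h2 : ("role" ∈ k :: ks) ↔ ("role" ∈ ks) := by
          simp [List.mem_cons, Ne.symm hr]
        simp [h1, h2]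
    · rw [hhd1]
      by_cases hr : k = "project"
      · subst hr
        simp only [beq_self_eq_true, if_true, List.mem_cons, true_or]
        rw [hGk, List.map_cons]
      · have h1 : (k == "project") = false := by simp [hr]
        have h2 : ("project" ∈ k :: ks) ↔ ("project" ∈ ks) := by
          simp [List.mem_cons, Ne.symm hr]
        simp [h1, h2]

-- B's scan applied to the sorted tagged list, fully named
theorem fasScan_sorted (sections : List (List (String × String))) :
    fasScan (PySem.List.sorted
        (sections.map (fun s => (secGet s "section_type" "general", s))) (fun t => t.1) false)
      = ((ksOf sections).map (fun k =>
            countLine (k, ((sections.map (fun s => secGet s "section_type" "general")).count k : Int))),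
         sections.filter (fun s => secGet? s "section_type" == some "role"),
         sections.filter (fun s => secGet? s "section_type" == some "project")) := by
  have h0 : sections.map (fun s => (secGet s "section_type" "general", s)) = tagOf sections := rfl
  rw [h0, sorted_tag_eq,
    fasScan_flatMap (grp sections) (ksOf sections)
      (PySem.List.sorted_ofList_pairwise_lt
        (xs := sections.map (fun s => secGet s "section_type" "general")))
      ?hne ?hkey]
  case hne =>
    intro k hk
    have hmem : k ∈ sections.map (fun s => secGet s "section_type" "general") :=
      (mem_ksOf sections k).1 hk
    rw [List.mem_map] at hmem
    obtain ⟨s, hs, hF⟩ := hmem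
    have : (secGet s "section_type" "general", s) ∈ grp sections k := by
      rw [grp, tagOf, List.mem_filter]
      refine ⟨List.mem_map.2 ⟨s, hs, rfl⟩, by simp [hF]⟩
    exact List.ne_nil_of_mem this
  case hkey =>
    intro k _ x hx
    have := (List.mem_filter.1 hx).2
    simpa using this
  refine congrArg₂ Prod.mk ?_ (congrArg₂ Prod.mk ?_ ?_)
  · apply List.map_congr_left
    intro k _
    rw [grp_len]
  · exact roles_comp sections
  · exact projects_comp sections

-- ===== VERDICT (by name: the statement is the Claim_ definition above) =====
theorem format_all_summary_py_spec : Claim_equal_format_all_summary_py := by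
  intro sections _
  unfold Spec_format_all_summary_py format_all_summary_py format_all_summary_py_alt
  simp only [fasScan_sorted, a_counts, PySem.List.foldl_append_singleton_eq_map,
    List.map_map, Function.comp_def, List.append_assoc, List.cons_append, List.nil_append]
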